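-- pv_equiv track=rewrite | github.com/vidagharavian/graph_clustring | graph_clustring.py | degree_matrix
-- ===== SOURCE A (Python) =====
-- def degree_matrix(A: list) -> list:
--     count = 0
--     D = []
--     for element in A:
--         row = []
--         sum = 0
--         for i in range(len(element)):
--             row.append(0)
--             sum += element[i] if i != count else 0
--
--         row[count] = sum
--         D.append(row)
--         count += 1
--     return D
-- ===== SOURCE B (Python) =====
-- def degree_matrix(A: list) -> list:
--     def build(rows, i):
--         if not rows:
--             return []
--         r = rows[0]
--         row = [0] * len(r)
--         row[i] = sum(r) - r[i]
--         return [row] + build(rows[1:], i + 1)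
--     return build(A, 0)
-- ===== Notes on version B (the rewrite author's own statement) =====
-- stated objective: alternative
-- what changed: A iterates with a counter and an interleaved inner index loop that appends zeros while accumulating the off-diagonal sum, then overwrites the diagonal slot; B recurses on the structure of the row list, building each row at once as [0]*len(r) with the builtin sum(r)-r[i] placed on the diagonal and prepending it to the recursive result for the tail.
import Mathlib
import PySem

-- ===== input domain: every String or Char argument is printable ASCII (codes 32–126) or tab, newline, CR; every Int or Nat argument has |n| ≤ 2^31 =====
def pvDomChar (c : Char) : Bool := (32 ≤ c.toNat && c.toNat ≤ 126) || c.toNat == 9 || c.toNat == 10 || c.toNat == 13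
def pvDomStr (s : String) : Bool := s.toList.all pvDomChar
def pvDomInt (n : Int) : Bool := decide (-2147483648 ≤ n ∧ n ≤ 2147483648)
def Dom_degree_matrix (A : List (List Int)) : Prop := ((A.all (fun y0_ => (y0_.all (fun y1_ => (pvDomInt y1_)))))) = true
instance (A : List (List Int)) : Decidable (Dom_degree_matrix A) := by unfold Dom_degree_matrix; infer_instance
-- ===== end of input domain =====

-- B replaces A's counter loop with an interleaved inner index loop by structural recursion
-- over the row list, building each row in one step ([0]*len with builtin sum on the diagonal).
-- Objective: alternative decomposition; same asymptotic cost.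

-- ===== PORT A =====
-- one iteration of A's outer loop: state = (count, D)
def dmStepA (st : Nat × List (List Int)) (element : List Int) : Nat × List (List Int) :=
  -- inner loop over range(len(element)): row.append(0); sum += element[i] if i != count else 0
  let p := (List.range element.length).foldl
      (fun (q : List Int × Int) i =>
        (q.1 ++ [0], q.2 + (if i ≠ st.1 then element.getD i 0 else 0)))
      ([], 0)
  -- row[count] = sum; D.append(row); count += 1
  (st.1 + 1, st.2 ++ [p.1.set st.1 p.2])

def degree_matrix (A : List (List Int)) : List (List Int) :=
  (A.foldl dmStepA (0, [])).2

-- ===== PORT B =====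
-- B's recursive helper 'build(rows, i)'
def dmBuild : List (List Int) → Nat → List (List Int)
  | [], _ => []
  | r :: rest, i =>
      ((List.replicate r.length 0).set i (r.sum - r.getD i 0)) :: dmBuild rest (i + 1)

def degree_matrix_alt (A : List (List Int)) : List (List Int) := dmBuild A 0

-- ===== PRECONDITION & SPEC =====
-- Pre_ excludes exactly the ragged inputs where row i has length ≤ i: there A's
-- 'row[count] = sum' raises IndexError (B's 'r[i]' raises the same exception).
def Pre_degree_matrix (A : List (List Int)) : Prop :=
  ∀ p ∈ A.zipIdx, p.2 < p.1.length
instance (A : List (List Int)) : Decidable (Pre_degree_matrix A) := by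
  unfold Pre_degree_matrix; infer_instance

def pvWitness_degree_matrix : List (List Int) := [[0, 1, 1], [1, 0, 2], [1, 2, 0]]

def Spec_degree_matrix (A : List (List Int)) (out : List (List Int)) : Prop := out = degree_matrix_alt A
instance (A : List (List Int)) (out : List (List Int)) : Decidable (Spec_degree_matrix A out) := by unfold Spec_degree_matrix; infer_instance

-- ===== CLAIM (what is proved, stated in full; the proofs are below) =====
def Claim_equal_degree_matrix : Prop := ∀ (A : List (List Int)), Dom_degree_matrix A → Pre_degree_matrix A → Spec_degree_matrix A (degree_matrix A)

-- ===== LEMMAS AND PROOFS =====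

-- the common row value: n zeros with s at position c
def diagRow (n c : Nat) (s : Int) : List Int :=
  (List.range n).map (fun j => if c = j then s else 0)

-- A's inner loop computes (n zeros, off-diagonal sum)
theorem innerA (r : List Int) (c : Nat) :
    (List.range r.length).foldl
      (fun (q : List Int × Int) i =>
        (q.1 ++ [0], q.2 + (if i ≠ c then r.getD i 0 else 0)))
      ([], 0)
    = (List.replicate r.length 0,
       ((List.range r.length).map (fun i => if i ≠ c then r.getD i 0 else 0)).sum) := by
  generalize r.length = n
  induction n with
  | zero => rfl
  | succ m ih =>
    rw [List.range_succ, List.foldl_append, ih]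
    simp [List.replicate_succ']

theorem replicate_set (n c : Nat) (s : Int) (_hc : c < n) :
    (List.replicate n 0).set c s = diagRow n c s := by
  apply List.ext_getElem
  · simp [diagRow]
  · intro i h1 h2
    simp only [diagRow, List.getElem_set, List.getElem_replicate,
      List.getElem_map, List.getElem_range]

theorem map_getD_range (xs : List Int) :
    (List.range xs.length).map (fun i => xs.getD i 0) = xs := by
  apply List.ext_getElem
  · simp
  · intro i h1 h2
    simp [List.getD_eq_getElem?_getD, List.getElem?_eq_getElem h2]

theorem offdiag_sum (r : List Int) (c : Nat) (hc : c < r.length) :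
    ((List.range r.length).map (fun i => if i ≠ c then r.getD i 0 else 0)).sum
      = r.sum - r.getD c 0 := by
  induction r using List.reverseRecOn with
  | nil => simp at hc
  | append_singleton xs x ih =>
    rw [List.length_append, List.length_singleton, List.range_succ]
    by_cases h : c = xs.length
    · subst h
      have heq : ∀ i ∈ List.range xs.length,
          (if i ≠ xs.length then (xs ++ [x]).getD i 0 else 0)
            = xs.getD i 0 := by
        intro i hi
        simp only [List.mem_range] at hi
        rw [if_pos (Nat.ne_of_lt hi)]
        simp [List.getD_eq_getElem?_getD, List.getElem?_append_left hi]
      rw [List.map_append, List.sum_append, List.map_congr_left heq, map_getD_range]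
      simp [List.getD_eq_getElem?_getD]
    · have hc' : c < xs.length := by
        simp only [List.length_append, List.length_singleton] at hc; omega
      have heq : ∀ i ∈ List.range xs.length,
          (if i ≠ c then (xs ++ [x]).getD i 0 else 0)
            = (if i ≠ c then xs.getD i 0 else 0) := by
        intro i hi
        simp only [List.mem_range] at hi
        by_cases hic : i = c <;>
          simp [hic, List.getD_eq_getElem?_getD, List.getElem?_append_left hi]
      rw [List.map_append, List.sum_append, List.map_congr_left heq, ih hc']
      have hx : (xs ++ [x]).getD c 0 = xs.getD c 0 := by
        simp [List.getD_eq_getElem?_getD, List.getElem?_append_left hc']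
      have hlast : (List.map (fun i => if i ≠ c then (xs ++ [x]).getD i 0 else 0)
          [xs.length]).sum = x := by
        have hne : xs.length ≠ c := fun hh => h hh.symm
        simp [hne, List.getD_eq_getElem?_getD]
      simp only [List.sum_append, List.sum_cons, List.sum_nil, hx, hlast]
      ring

-- one step of A produces the diagonal row, under the in-range condition
theorem dmStepA_eq (st : Nat × List (List Int)) (r : List Int) (h : st.1 < r.length) :
    dmStepA st r
      = (st.1 + 1, st.2 ++ [diagRow r.length st.1 (r.sum - r.getD st.1 0)]) := by
  simp only [dmStepA]
  rw [innerA, replicate_set _ _ _ h, offdiag_sum _ _ h]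

-- A's fold, from an arbitrary count and accumulator
theorem foldA (A : List (List Int)) : ∀ (k : Nat) (acc : List (List Int)),
    (∀ p ∈ A.zipIdx k, p.2 < p.1.length) →
    (A.foldl dmStepA (k, acc)).2
      = acc ++ (A.zipIdx k).map (fun ri =>
          diagRow ri.1.length ri.2 (ri.1.sum - ri.1.getD ri.2 0)) := by
  induction A with
  | nil => simp
  | cons r rest ih =>
    intro k acc hpre
    have hr : k < r.length := by
      have := hpre (r, k) (by simp [List.zipIdx_cons]); simpa using this
    have hrest : ∀ p ∈ rest.zipIdx (k + 1), p.2 < p.1.length := by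
      intro p hp; exact hpre p (by simp [List.zipIdx_cons, hp])
    rw [List.foldl_cons, dmStepA_eq ⟨k, acc⟩ _ hr, ih (k + 1) _ hrest]
    simp [List.zipIdx_cons]

-- B's recursion equals the same zipIdx/diagRow form
theorem buildB (A : List (List Int)) : ∀ (k : Nat),
    (∀ p ∈ A.zipIdx k, p.2 < p.1.length) →
    dmBuild A k
      = (A.zipIdx k).map (fun ri =>
          diagRow ri.1.length ri.2 (ri.1.sum - ri.1.getD ri.2 0)) := by
  induction A with
  | nil => intro k _; rfl
  | cons r rest ih =>
    intro k hpre
    have hr : k < r.length := by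
      have := hpre (r, k) (by simp [List.zipIdx_cons]); simpa using this
    have hrest : ∀ p ∈ rest.zipIdx (k + 1), p.2 < p.1.length := by
      intro p hp; exact hpre p (by simp [List.zipIdx_cons, hp])
    simp only [dmBuild, replicate_set _ _ _ hr, ih (k + 1) hrest, List.zipIdx_cons,
      List.map_cons]

-- ===== VERDICT (by name: the statement is the Claim_ definition above) =====
theorem degree_matrix_spec : Claim_equal_degree_matrix := by
  intro A _ hpre
  unfold Pre_degree_matrix at hpre
  unfold Spec_degree_matrix degree_matrix degree_matrix_alt
  rw [buildB A 0 hpre, foldA A 0 [] hpre]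
  simp
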